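-- pv_equiv track=rewrite | github.com/nermadie/CodeForces_Solutions | CodeforcesRound886Div4/prob04.py | min_problems_to_remove
-- ===== SOURCE A (Python) =====
-- def min_problems_to_remove(n, k, difficulties):
--     difficulties.sort()
--     max_len = 1
--     count = 1
--     for i in range(n - 1):
--         if difficulties[i + 1] - difficulties[i] <= k:
--             count += 1
--             if count > max_len:
--                 max_len = count
--         else:
--             count = 1
--     return n - max_len
-- ===== SOURCE B (Python) =====
-- def min_problems_to_remove(n, k, difficulties):
--     difficulties.sort()
--     breaks = [i for i in range(n - 1) if difficulties[i + 1] - difficulties[i] > k]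
--     bounds = [-1] + breaks + [n - 1]
--     max_len = max([1] + [b - a for a, b in zip(bounds, bounds[1:])])
--     return n - max_len
-- ===== Notes on version B (the rewrite author's own statement) =====
-- stated objective: alternative
-- what changed: Replaces A's running-count/running-max scan with computing the break positions of the sorted list and taking the maximum distance between consecutive run boundaries.
-- outside the precondition, e.g. on min_problems_to_remove(3, 1, [1, 5]): A raises IndexError, B raises IndexError
import Mathlib
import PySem

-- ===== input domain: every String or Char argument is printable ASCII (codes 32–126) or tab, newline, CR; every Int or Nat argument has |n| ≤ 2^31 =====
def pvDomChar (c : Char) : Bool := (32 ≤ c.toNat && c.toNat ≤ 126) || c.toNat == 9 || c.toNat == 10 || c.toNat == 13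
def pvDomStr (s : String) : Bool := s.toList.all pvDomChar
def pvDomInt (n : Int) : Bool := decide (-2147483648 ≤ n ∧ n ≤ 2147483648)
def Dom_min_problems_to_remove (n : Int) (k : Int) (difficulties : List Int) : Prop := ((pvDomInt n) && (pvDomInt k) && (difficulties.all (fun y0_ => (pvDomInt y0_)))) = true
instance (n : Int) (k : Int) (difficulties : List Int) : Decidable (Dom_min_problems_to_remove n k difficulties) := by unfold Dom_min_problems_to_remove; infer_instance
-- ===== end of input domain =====

-- B replaces A's running-count/running-max scan by computing the break positions of the
-- sorted list and taking the maximal distance between consecutive boundaries (objective: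
-- alternative decomposition, same cost). Both A and B sort `difficulties` in place; the
-- equivalence proved here is about the return value (the mutation is identical anyway).

-- ===== PORT A =====
def min_problems_to_remove (n : Int) (k : Int) (difficulties : List Int) : Int :=
  let d := PySem.List.sorted difficulties (fun x => x) false
  let s := (PySem.List.pyRange 0 (n - 1) 1).foldl
    (fun (st : Int × Int) i =>
      if PySem.List.pyGetD d (i + 1) 0 - PySem.List.pyGetD d i 0 ≤ k then
        let c := st.2 + 1
        (if c > st.1 then c else st.1, c)
      else (st.1, 1)) (1, 1)
  n - s.1

-- ===== PORT B =====
def min_problems_to_remove_alt (n : Int) (k : Int) (difficulties : List Int) : Int :=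
  let d := PySem.List.sorted difficulties (fun x => x) false
  let breaks := (PySem.List.pyRange 0 (n - 1) 1).filter
    (fun i => decide (PySem.List.pyGetD d (i + 1) 0 - PySem.List.pyGetD d i 0 > k))
  let bounds := (-1 : Int) :: (breaks ++ [n - 1])
  let maxLen := (List.zipWith (fun a b => b - a) bounds bounds.tail).foldl max 1
  n - maxLen

-- ===== PRECONDITION & SPEC =====
-- Pre_ excludes exactly the inputs on which Python A raises IndexError: n ≥ 2 with fewer
-- than n difficulties (the loop indexes difficulties[0..n-1]).
def Pre_min_problems_to_remove (n : Int) (k : Int) (difficulties : List Int) : Prop :=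
  n ≤ (difficulties.length : Int) ∨ n ≤ 1
instance (n : Int) (k : Int) (difficulties : List Int) : Decidable (Pre_min_problems_to_remove n k difficulties) := by unfold Pre_min_problems_to_remove; infer_instance
def pvWitness_min_problems_to_remove : Int × Int × List Int := (4, 1, [5, 1, 2, 7])

def Spec_min_problems_to_remove (n : Int) (k : Int) (difficulties : List Int) (out : Int) : Prop := out = min_problems_to_remove_alt n k difficulties
instance (n : Int) (k : Int) (difficulties : List Int) (out : Int) : Decidable (Spec_min_problems_to_remove n k difficulties out) := by unfold Spec_min_problems_to_remove; infer_instance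

-- ===== CLAIM (what is proved, stated in full; the proofs are below) =====
def Claim_equal_min_problems_to_remove : Prop := ∀ (n : Int) (k : Int) (difficulties : List Int), Dom_min_problems_to_remove n k difficulties → Pre_min_problems_to_remove n k difficulties → Spec_min_problems_to_remove n k difficulties (min_problems_to_remove n k difficulties)

-- ===== LEMMAS AND PROOFS =====

-- adjacent differences of a bounds list (the list B folds max over)
def pvDiffs (bounds : List Int) : List Int :=
  List.zipWith (fun a b => b - a) bounds bounds.tail

-- the break indices among 0..M-1
def pvBreaks (d : List Int) (k M : Int) : List Int :=
  (PySem.List.pyRange 0 M 1).filter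
    (fun i => decide (PySem.List.pyGetD d (i + 1) 0 - PySem.List.pyGetD d i 0 > k))

def pvLast (d : List Int) (k M : Int) : Int :=
  ((-1 : Int) :: pvBreaks d k M).getLast (by simp)

def pvBmax (d : List Int) (k M : Int) : Int :=
  (pvDiffs ((-1 : Int) :: (pvBreaks d k M ++ [M]))).foldl max 1

theorem pvDiffs_snoc (h : Int) (bs : List Int) (e : Int) :
    pvDiffs (h :: (bs ++ [e]))
      = pvDiffs (h :: bs) ++ [e - (h :: bs).getLast (by simp)] := by
  induction bs generalizing h with
  | nil => simp [pvDiffs]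
  | cons x t ih => simpa [pvDiffs] using ih x

theorem pv_one_le_foldl_max (L : List Int) : 1 ≤ L.foldl max 1 :=
  (PySem.List.le_foldl_max L 1).1

theorem pv_inv (d : List Int) (k : Int) (m : Nat) :
    (PySem.List.pyRange 0 (m : Int) 1).foldl
      (fun (st : Int × Int) i =>
        if PySem.List.pyGetD d (i + 1) 0 - PySem.List.pyGetD d i 0 ≤ k then
          let c := st.2 + 1
          (if c > st.1 then c else st.1, c)
        else (st.1, 1)) (1, 1)
      = (pvBmax d k m, (m : Int) - pvLast d k m) := by
  induction m with
  | zero =>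
      simp [PySem.List.pyRange_one_eq_nil, pvBmax, pvLast, pvBreaks, pvDiffs]
  | succ m ih =>
      have hcast : ((m + 1 : Nat) : Int) = (m : Int) + 1 := by push_cast; ring
      have hrange : PySem.List.pyRange 0 ((m : Int) + 1) 1
          = PySem.List.pyRange 0 (m : Int) 1 ++ [(m : Int)] :=
        PySem.List.pyRange_one_succ_right (by positivity)
      have hbr : pvBreaks d k ((m : Int) + 1)
          = pvBreaks d k (m : Int) ++
            (if PySem.List.pyGetD d ((m : Int) + 1) 0 - PySem.List.pyGetD d (m : Int) 0 > k
             then [(m : Int)] else []) := by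
        simp only [pvBreaks, hrange, List.filter_append, List.filter_cons, List.filter_nil]
        by_cases h : PySem.List.pyGetD d ((m : Int) + 1) 0 - PySem.List.pyGetD d (m : Int) 0 > k <;>
          simp [h]
      rw [hcast, hrange, List.foldl_append, ih]
      simp only [List.foldl_cons, List.foldl_nil]
      by_cases hb : PySem.List.pyGetD d ((m : Int) + 1) 0 - PySem.List.pyGetD d (m : Int) 0 ≤ k
      · -- no break at m : run continues
        have hb' : ¬ (PySem.List.pyGetD d ((m : Int) + 1) 0 - PySem.List.pyGetD d (m : Int) 0 > k) := by omega
        have hbr' : pvBreaks d k ((m : Int) + 1) = pvBreaks d k (m : Int) := by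
          rw [hbr, if_neg hb']; simp
        have hlast : pvLast d k ((m : Int) + 1) = pvLast d k (m : Int) := by
          simp [pvLast, hbr']
        have hmax : ∀ M : Int, pvBmax d k M
            = max ((pvDiffs ((-1 : Int) :: pvBreaks d k M)).foldl max 1)
                  (M - pvLast d k M) := by
          intro M
          rw [pvBmax, pvDiffs_snoc, List.foldl_append]
          simp [pvLast]
        rw [if_pos hb]
        simp only [Prod.mk.injEq]
        refine ⟨?_, ?_⟩
        · rw [hmax, hmax, hbr', hlast]
          set D := (pvDiffs ((-1 : Int) :: pvBreaks d k (m : Int))).foldl max 1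
          split_ifs <;> omega
        · rw [hlast]; ring
      · -- break at m : run resets
        have hbr' : pvBreaks d k ((m : Int) + 1) = pvBreaks d k (m : Int) ++ [(m : Int)] := by
          rw [hbr, if_pos (by omega)]
        have hlast : pvLast d k ((m : Int) + 1) = (m : Int) := by
          simp [pvLast, hbr']
        rw [if_neg hb]
        simp only [Prod.mk.injEq]
        refine ⟨?_, ?_⟩
        · have h1 : pvBmax d k ((m : Int) + 1)
              = max ((pvDiffs ((-1 : Int) :: (pvBreaks d k (m : Int) ++ [(m : Int)]))).foldl max 1)
                    (((m : Int) + 1) - (m : Int)) := by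
            rw [pvBmax, hbr']
            rw [show ((-1 : Int) :: ((pvBreaks d k (m : Int) ++ [(m : Int)]) ++ [(m : Int) + 1]))
                  = ((-1 : Int) :: (pvBreaks d k (m : Int) ++ [(m : Int)])) ++ [(m : Int) + 1] by simp]
            rw [show ((-1 : Int) :: (pvBreaks d k (m : Int) ++ [(m : Int)])) ++ [(m : Int) + 1]
                  = (-1 : Int) :: ((pvBreaks d k (m : Int) ++ [(m : Int)]) ++ [(m : Int) + 1]) by simp]
            rw [pvDiffs_snoc, List.foldl_append]
            have : ((-1 : Int) :: (pvBreaks d k (m : Int) ++ [(m : Int)])).getLast (by simp) = (m : Int) := by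
              simp
            rw [this]
            simp
          have h2 : (pvDiffs ((-1 : Int) :: (pvBreaks d k (m : Int) ++ [(m : Int)]))).foldl max 1
              = pvBmax d k (m : Int) := by rw [pvBmax]
          have h3 : 1 ≤ pvBmax d k (m : Int) := pv_one_le_foldl_max _
          rw [h1, h2]
          omega
        · rw [hlast]; ring

-- ===== VERDICT (by name: the statement is the Claim_ definition above) =====
theorem min_problems_to_remove_spec : Claim_equal_min_problems_to_remove := by
  intro n k difficulties _ _
  simp only [Spec_min_problems_to_remove, min_problems_to_remove, min_problems_to_remove_alt]
  by_cases hn : 1 ≤ n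
  · have hm : ((n - 1).toNat : Int) = n - 1 := Int.toNat_of_nonneg (by omega)
    have hinv := pv_inv (PySem.List.sorted difficulties (fun x => x) false) k (n - 1).toNat
    rw [hm] at hinv
    rw [hinv]
    simp only [pvBmax, pvBreaks, pvDiffs]
  · have h0 : PySem.List.pyRange 0 (n - 1) 1 = [] :=
      PySem.List.pyRange_one_eq_nil (by omega)
    rw [h0]
    simp only [List.foldl_nil, List.filter_nil, List.nil_append, List.tail_cons,
      List.zipWith_cons_cons, List.zipWith_nil_right, List.foldl_cons]
    omega
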